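-- pv_equiv track=rewrite | github.com/chennyso/agent | torchtitan/torchtitan/experiments/hybrid_policy/config_registry.py | _contiguous_ranges_from_counts
-- ===== SOURCE A (Python) =====
-- def _contiguous_ranges_from_counts(counts: list[int]) -> list[tuple[int, int]]:
--     start = 0
--     ranges: list[tuple[int, int]] = []
--     for count in counts:
--         end = start + count - 1
--         ranges.append((start, end))
--         start = end + 1
--     return ranges
-- ===== SOURCE B (Python) =====
-- def _contiguous_ranges_from_counts(counts: list[int]) -> list[tuple[int, int]]:
--     # Build the prefix-sum table of cumulative ends first, then map it to ranges.
--     ends = []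
--     total = 0
--     for c in counts:
--         total += c
--         ends.append(total)
--     return [(e - c, e - 1) for c, e in zip(counts, ends)]
-- ===== Notes on version B (the rewrite author's own statement) =====
-- stated objective: alternative
-- what changed: Instead of threading a running start through one loop that emits pairs, B first materializes the prefix-sum table of cumulative endpoints and then maps each (count, cumulative end) pair to (end-count, end-1) in a second pass.
import Mathlib
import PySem

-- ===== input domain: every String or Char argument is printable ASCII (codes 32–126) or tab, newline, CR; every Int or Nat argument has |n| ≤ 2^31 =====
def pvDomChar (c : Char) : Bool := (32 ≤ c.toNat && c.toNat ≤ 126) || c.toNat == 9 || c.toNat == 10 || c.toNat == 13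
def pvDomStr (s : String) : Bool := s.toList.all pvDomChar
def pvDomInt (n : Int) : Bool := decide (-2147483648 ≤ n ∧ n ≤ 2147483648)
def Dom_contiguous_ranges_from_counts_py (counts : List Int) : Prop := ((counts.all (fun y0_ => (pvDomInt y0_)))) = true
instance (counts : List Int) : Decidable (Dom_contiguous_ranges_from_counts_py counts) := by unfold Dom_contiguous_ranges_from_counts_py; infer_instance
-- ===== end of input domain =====

-- B builds a prefix-sum table of cumulative endpoints first and maps it to ranges
-- in a second pass, instead of threading a running start through one emitting loop.

-- ===== PORT A =====
-- one loop threading (start, ranges)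
def contiguous_ranges_from_counts_py (counts : List Int) : List (Int × Int) :=
  (counts.foldl
    (fun (st : Int × List (Int × Int)) count =>
      let e := st.1 + count - 1
      (e + 1, st.2 ++ [(st.1, e)]))
    (0, [])).2

-- ===== PORT B =====
-- pass 1 of Source B: the prefix-sum table `ends`
def pvEnds : List Int → Int → List Int
  | [], _ => []
  | c :: cs, t => (t + c) :: pvEnds cs (t + c)

-- pass 2 of Source B: zip counts with ends and map to ranges
def contiguous_ranges_from_counts_py_alt (counts : List Int) : List (Int × Int) :=
  (counts.zip (pvEnds counts 0)).map (fun ce => (ce.2 - ce.1, ce.2 - 1))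

-- ===== PRECONDITION & SPEC =====
def Spec_contiguous_ranges_from_counts_py (counts : List Int) (out : List (Int × Int)) : Prop := out = contiguous_ranges_from_counts_py_alt counts
instance (counts : List Int) (out : List (Int × Int)) : Decidable (Spec_contiguous_ranges_from_counts_py counts out) := by unfold Spec_contiguous_ranges_from_counts_py; infer_instance

-- ===== CLAIM (what is proved, stated in full; the proofs are below) =====
def Claim_equal_contiguous_ranges_from_counts_py : Prop := ∀ (counts : List Int), Dom_contiguous_ranges_from_counts_py counts → Spec_contiguous_ranges_from_counts_py counts (contiguous_ranges_from_counts_py counts)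

-- ===== LEMMAS AND PROOFS =====

-- loop invariant: A's fold from (s, acc) appends exactly B's zipped/mapped ranges with offset s
theorem pv_fold_eq (counts : List Int) :
    ∀ (s : Int) (acc : List (Int × Int)),
      (counts.foldl
        (fun (st : Int × List (Int × Int)) count =>
          let e := st.1 + count - 1
          (e + 1, st.2 ++ [(st.1, e)]))
        (s, acc)).2
      = acc ++ (counts.zip (pvEnds counts s)).map (fun ce => (ce.2 - ce.1, ce.2 - 1)) := by
  induction counts with
  | nil => intro s acc; simp
  | cons c cs ih =>
    intro s acc
    simp only [List.foldl, pvEnds, List.zip_cons_cons, List.map_cons]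
    rw [show s + c - 1 + 1 = s + c from by omega, ih,
        show s + c - c = s from by omega]
    simp

-- ===== VERDICT (by name: the statement is the Claim_ definition above) =====
theorem contiguous_ranges_from_counts_py_spec : Claim_equal_contiguous_ranges_from_counts_py := by
  intro counts _
  unfold Spec_contiguous_ranges_from_counts_py contiguous_ranges_from_counts_py contiguous_ranges_from_counts_py_alt
  rw [pv_fold_eq]
  simp
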